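-- pv_equiv track=rewrite | github.com/jzftran/InterMetalDB | build_db/tools.py | check_complex_type
-- ===== SOURCE A (Python) =====
-- amino_acids= ['ALA', 'CYS', 'ASP', 'GLU', 'PHE', 'GLY', 'HIS', 'ILE', 'LYS',
--                'LEU', 'MET', 'ASN', 'PRO', 'GLN', 'ARG', 'SER', 'THR', 'VAL',
--                  'TRP', 'TYR']
--
-- deoxyribonucleotides = ['DA', 'DC', 'DG', 'DT', 'DI']
--
-- ribonucleotides = ['A', 'C', 'G', 'U', 'I']
--
-- def check_complex_type(residues):
--     """Returns complex type, based on the provided residues."""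
--
--     isProtein = bool()
--     isRNA = bool()
--     isDNA = bool()
--     otherType = bool()
--
--
--     if any(residue+'.' in residues for residue in  amino_acids):
--         isProtein = True
--
--     if any(residue+'.' in residues  for residue in  ribonucleotides):
--         isRNA = True
--     if any(residue+'.' in residues for residue in deoxyribonucleotides ):
--         isDNA = True
--     if any(residue.rstrip('.') not in
--             set((*amino_acids, *ribonucleotides, *deoxyribonucleotides))
--               for residue in residues):
--         otherType = True
--
--
--     complexes_flags = {
--         (True, True, True): 'DPR',
--         (True, False, True): 'DP',
--         (False, True, True): 'DR',
--         (True, True, False): 'PR',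
--         (True, False, False): 'PP',
--         (False, True, False): 'RR',
--         (False, False, False): 'OC',
--     }
--
--
--
--     if otherType:
--         return 'OC'
--     else:
--         return complexes_flags[isProtein, isRNA, isDNA]
-- ===== SOURCE B (Python) =====
-- amino_acids = ['ALA', 'CYS', 'ASP', 'GLU', 'PHE', 'GLY', 'HIS', 'ILE', 'LYS',
--                'LEU', 'MET', 'ASN', 'PRO', 'GLN', 'ARG', 'SER', 'THR', 'VAL',
--                'TRP', 'TYR']
--
-- deoxyribonucleotides = ['DA', 'DC', 'DG', 'DT', 'DI']
--
-- ribonucleotides = ['A', 'C', 'G', 'U', 'I']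
--
--
-- def check_complex_type(residues):
--     """Returns complex type, based on the provided residues (single pass)."""
--     prot = {a + '.' for a in amino_acids}
--     rna = {n + '.' for n in ribonucleotides}
--     dna = {n + '.' for n in deoxyribonucleotides}
--     allowed = set(amino_acids + ribonucleotides + deoxyribonucleotides)
--
--     isProtein = isRNA = isDNA = otherType = False
--     for r in residues:
--         if r in prot:
--             isProtein = True
--         if r in rna:
--             isRNA = True
--         if r in dna:
--             isDNA = True
--         if r.rstrip('.') not in allowed:
--             otherType = True
--
--     if otherType:
--         return 'OC'
--     if isDNA:
--         if isProtein and isRNA: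
--             return 'DPR'
--         if isProtein:
--             return 'DP'
--         if isRNA:
--             return 'DR'
--         return 'DD'
--     if isProtein and isRNA:
--         return 'PR'
--     if isProtein:
--         return 'PP'
--     if isRNA:
--         return 'RR'
--     return 'OC'
-- ===== Notes on version B (the rewrite author's own statement) =====
-- stated objective: faster
-- what changed: B makes a single pass over the input residues maintaining four flags against precomputed hash sets, instead of A's four scans of the constant lists each with an inner linear scan of residues, and replaces A's partial flags-dict with a complete if-chain.
-- crash fix: On residue lists containing some deoxyribonucleotide token 'X.' but no amino-acid or ribonucleotide dotted token and no unknown residue, A raises KeyError (its flags dict has no (False, False, True) key); B returns 'DD' for such a pure-DNA complex. — e.g. on check_complex_type(["DA."]): A raises KeyError, B returns "DD"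
import Mathlib
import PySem

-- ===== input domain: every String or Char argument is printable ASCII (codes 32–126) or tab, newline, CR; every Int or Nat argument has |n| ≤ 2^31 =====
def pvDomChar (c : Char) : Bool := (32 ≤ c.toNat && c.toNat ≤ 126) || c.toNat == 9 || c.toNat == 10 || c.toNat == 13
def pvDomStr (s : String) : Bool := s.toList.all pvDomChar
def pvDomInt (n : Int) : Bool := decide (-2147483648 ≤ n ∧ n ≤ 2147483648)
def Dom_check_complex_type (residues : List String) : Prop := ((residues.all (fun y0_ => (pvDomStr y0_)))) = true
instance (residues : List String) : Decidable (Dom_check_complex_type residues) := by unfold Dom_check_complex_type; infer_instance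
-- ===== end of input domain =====

-- B replaces A's four scans of the constant lists (each with an inner linear scan of residues) by one
-- pass over the input against precomputed sets, and A's partial flags-dict by a complete if-chain
-- (measured faster in a timing run; constant-factor).

-- shared module-level constants (same-module context of A, used by both ports)
def pvAmino : List String := ["ALA", "CYS", "ASP", "GLU", "PHE", "GLY", "HIS", "ILE", "LYS",
  "LEU", "MET", "ASN", "PRO", "GLN", "ARG", "SER", "THR", "VAL", "TRP", "TYR"]
def pvDeoxy : List String := ["DA", "DC", "DG", "DT", "DI"]
def pvRibo : List String := ["A", "C", "G", "U", "I"]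

-- hand port of Python's r.rstrip('.') (drop trailing '.' characters); exact on all strings
def pvRstripDot (s : String) : String := String.ofList ((s.toList.reverse.dropWhile (· == '.')).reverse)

-- ===== PORT A =====
def check_complex_type (residues : List String) : String :=
  let isProtein := pvAmino.any (fun residue => residues.contains (residue ++ "."))
  let isRNA := pvRibo.any (fun residue => residues.contains (residue ++ "."))
  let isDNA := pvDeoxy.any (fun residue => residues.contains (residue ++ "."))
  let allowed : PySem.Set String := PySem.Set.ofList (pvAmino ++ pvRibo ++ pvDeoxy)
  let otherType := residues.any (fun residue => !(allowed.contains (pvRstripDot residue)))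
  let complexes_flags : PySem.Dict (Bool × Bool × Bool) String :=
    ((((((PySem.Dict.empty.insert (true, true, true) "DPR").insert
      (true, false, true) "DP").insert (false, true, true) "DR").insert
      (true, true, false) "PR").insert (true, false, false) "PP").insert
      (false, true, false) "RR").insert (false, false, false) "OC"
  if otherType then "OC"
  else (complexes_flags.get? (isProtein, isRNA, isDNA)).getD ""   -- none = KeyError, excluded by Pre_

-- ===== PORT B =====
def check_complex_type_alt (residues : List String) : String :=
  let prot : PySem.Set String := PySem.Set.ofList (pvAmino.map (· ++ "."))
  let rna : PySem.Set String := PySem.Set.ofList (pvRibo.map (· ++ "."))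
  let dna : PySem.Set String := PySem.Set.ofList (pvDeoxy.map (· ++ "."))
  let allowed : PySem.Set String := PySem.Set.ofList (pvAmino ++ pvRibo ++ pvDeoxy)
  let st := residues.foldl
    (fun (s : Bool × Bool × Bool × Bool) r =>
      (s.1 || prot.contains r, s.2.1 || rna.contains r, s.2.2.1 || dna.contains r,
       s.2.2.2 || !(allowed.contains (pvRstripDot r))))
    (false, false, false, false)
  if st.2.2.2 then "OC"
  else if st.2.2.1 then
    if st.1 && st.2.1 then "DPR"
    else if st.1 then "DP"
    else if st.2.1 then "DR"
    else "DD"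
  else if st.1 && st.2.1 then "PR"
  else if st.1 then "PP"
  else if st.2.1 then "RR"
  else "OC"

-- ===== PRECONDITION & SPEC =====
-- Pre_ excludes exactly the pure-DNA inputs on which A raises KeyError (its flags dict has no
-- (False, False, True) key): some 'X.' with X a deoxyribonucleotide present, no amino-acid or
-- ribonucleotide dotted token, and every residue's rstrip('.') a known residue name.
def Pre_check_complex_type (residues : List String) : Prop :=
  ¬ ((∃ x ∈ pvDeoxy, (x ++ ".") ∈ residues) ∧
     (∀ x ∈ pvAmino, (x ++ ".") ∉ residues) ∧
     (∀ x ∈ pvRibo, (x ++ ".") ∉ residues) ∧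
     (∀ r ∈ residues, pvRstripDot r ∈ pvAmino ++ pvRibo ++ pvDeoxy))
instance (residues : List String) : Decidable (Pre_check_complex_type residues) := by
  unfold Pre_check_complex_type; infer_instance

def pvWitness_check_complex_type : List String := ["ALA.", "A."]

-- On pure-DNA residue lists A raises KeyError while B returns 'DD' (proved below as check_complex_type_raises).
def Raises_check_complex_type (residues : List String) : Prop :=
  (∃ x ∈ pvDeoxy, (x ++ ".") ∈ residues) ∧
  (∀ x ∈ pvAmino, (x ++ ".") ∉ residues) ∧
  (∀ x ∈ pvRibo, (x ++ ".") ∉ residues) ∧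
  (∀ r ∈ residues, pvRstripDot r ∈ pvAmino ++ pvRibo ++ pvDeoxy)
instance (residues : List String) : Decidable (Raises_check_complex_type residues) := by
  unfold Raises_check_complex_type; infer_instance

def pvRaiseWitness_check_complex_type : List String := ["DA."]
def pvRaiseWitnessOut_check_complex_type : String := "DD"

def Spec_check_complex_type (residues : List String) (out : String) : Prop :=
  out = check_complex_type_alt residues
instance (residues : List String) (out : String) : Decidable (Spec_check_complex_type residues out) := by
  unfold Spec_check_complex_type; infer_instance

-- ===== CLAIM =====
def Claim_equal_check_complex_type : Prop :=
  ∀ (residues : List String), Dom_check_complex_type residues →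
    Pre_check_complex_type residues →
    Spec_check_complex_type residues (check_complex_type residues)

def Claim_raises_check_complex_type : Prop :=
  (∀ (residues : List String), Dom_check_complex_type residues →
      Raises_check_complex_type residues → ¬ Pre_check_complex_type residues) ∧
  (Dom_check_complex_type (pvRaiseWitness_check_complex_type) ∧
   Raises_check_complex_type (pvRaiseWitness_check_complex_type) ∧
   check_complex_type_alt (pvRaiseWitness_check_complex_type) = pvRaiseWitnessOut_check_complex_type)

-- ===== LEMMAS AND PROOFS =====

-- B's fold accumulates disjunctions: closed form of the loop state
theorem pv_fold_spec (f g h o : String → Bool) (residues : List String) :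
    ∀ s : Bool × Bool × Bool × Bool,
      residues.foldl
        (fun (s : Bool × Bool × Bool × Bool) r =>
          (s.1 || f r, s.2.1 || g r, s.2.2.1 || h r, s.2.2.2 || o r)) s
      = (s.1 || residues.any f, s.2.1 || residues.any g,
         s.2.2.1 || residues.any h, s.2.2.2 || residues.any o) := by
  induction residues with
  | nil => intro s; simp
  | cons x xs ih =>
    intro s
    simp only [List.foldl_cons, List.any_cons, ih]
    obtain ⟨a, b, c, d⟩ := s
    simp [Bool.or_assoc]

-- swapping the scanned list: A scans the constant list, B scans the input
theorem pv_any_comm (xs ys : List String) :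
    xs.any (fun a => ys.contains a) = ys.any (fun a => xs.contains a) := by
  rw [Bool.eq_iff_iff]
  simp only [List.any_eq_true, List.contains_eq_mem, decide_eq_true_eq]
  exact ⟨fun ⟨a, h1, h2⟩ => ⟨a, h2, h1⟩, fun ⟨a, h1, h2⟩ => ⟨a, h2, h1⟩⟩

theorem pv_contains_ofList (L : List String) (r : String) :
    (PySem.Set.ofList L).contains r = L.contains r := by
  rw [Bool.eq_iff_iff]
  simp [PySem.Set.contains, PySem.Set.mem_ofList]

theorem pv_flag_eq (cat : List String) (residues : List String) :
    cat.any (fun residue => residues.contains (residue ++ "."))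
      = residues.any (fun r => (PySem.Set.ofList (cat.map (· ++ "."))).contains r) := by
  have h1 : cat.any (fun residue => residues.contains (residue ++ "."))
      = (cat.map (· ++ ".")).any (fun a => residues.contains a) := by
    simp [List.any_map, Function.comp_def]
  rw [h1, pv_any_comm]
  congr 1
  funext r
  rw [pv_contains_ofList]

theorem check_complex_type_raises : Claim_raises_check_complex_type := by
  unfold Claim_raises_check_complex_type
  constructor
  · intro residues _ hr hpre; exact hpre hr
  · decide

-- ===== VERDICT =====
theorem check_complex_type_spec : Claim_equal_check_complex_type := by
  intro residues hdom hpre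
  unfold Spec_check_complex_type check_complex_type check_complex_type_alt
  simp only [pv_fold_spec, Bool.false_or]
  rw [← pv_flag_eq pvAmino residues, ← pv_flag_eq pvRibo residues, ← pv_flag_eq pvDeoxy residues]
  set P := pvAmino.any (fun residue => residues.contains (residue ++ ".")) with hP
  set R := pvRibo.any (fun residue => residues.contains (residue ++ ".")) with hR
  set D := pvDeoxy.any (fun residue => residues.contains (residue ++ ".")) with hD
  set O := residues.any
      (fun residue => !((PySem.Set.ofList (pvAmino ++ pvRibo ++ pvDeoxy)).contains (pvRstripDot residue)))
    with hO
  -- exclude the raising case (F,F,T) with O = false using Pre_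
  by_cases hcase : P = false ∧ R = false ∧ D = true ∧ O = false
  · exfalso
    have hraise := check_complex_type_raises
    unfold Claim_raises_check_complex_type at hraise
    apply hraise.1 residues hdom ?_ hpre
    unfold Raises_check_complex_type
    obtain ⟨hp, hr, hd, ho⟩ := hcase
    refine ⟨?_, ?_, ?_, ?_⟩
    · rw [hD] at hd
      rw [List.any_eq_true] at hd
      obtain ⟨x, hx, hc⟩ := hd
      exact ⟨x, by simpa using hx, by simpa using hc⟩
    · intro x hx hmem
      rw [hP] at hp
      rw [List.any_eq_false] at hp
      exact absurd (by simpa using hmem) (by simpa using hp x (by simpa using hx))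
    · intro x hx hmem
      rw [hR] at hr
      rw [List.any_eq_false] at hr
      exact absurd (by simpa using hmem) (by simpa using hr x (by simpa using hx))
    · intro r hr'
      rw [hO] at ho
      rw [List.any_eq_false] at ho
      have := ho r (by simpa using hr')
      rw [Bool.not_eq_true', pv_contains_ofList] at this
      simp only [List.contains_eq_mem] at this
      by_contra hmem
      exact this (decide_eq_false hmem)
  · clear hpre
    revert hcase
    cases P <;> cases R <;> cases D <;> cases O <;> intro hcase <;> first
      | decide
      | (exact absurd ⟨rfl, rfl, rfl, rfl⟩ hcase)
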